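-- pv_equiv track=rewrite | github.com/Kikidragon/COMPSCI_1500 | zylabs/7. Strings/7.13_char_at_index.py | check_character
-- ===== SOURCE A (Python) =====
-- def check_character(word, index):
--     for i, char in enumerate(word):
--         if i == index:
--             if char.islower() == True or char.isupper() == True:
--                 return ("Character '{}' is a letter".format(char))
--             elif char.isspace() == True:
--                 return ("Character ' ' is a white space")
--             elif char.isdigit() == True:
--                 return ("Character '{}' is a digit".format(char))
--             else:
--                 return ("Character '{}' is unknown".format(char))
--         else:
--             continue
-- ===== SOURCE B (Python) =====
-- def check_character(word, index):
--     if index < 0 or index >= len(word):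
--         return None
--     char = word[index]
--     if char.islower() or char.isupper():
--         return "Character '{}' is a letter".format(char)
--     if char.isspace():
--         return "Character ' ' is a white space"
--     if char.isdigit():
--         return "Character '{}' is a digit".format(char)
--     return "Character '{}' is unknown".format(char)
-- ===== Notes on version B (the rewrite author's own statement) =====
-- stated objective: simpler
-- what changed: Replaces the enumerate scan (O(index) linear search for the position) with an explicit bounds guard returning None plus direct O(1) indexing of the character, then the same classification chain.
import Mathlib
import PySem

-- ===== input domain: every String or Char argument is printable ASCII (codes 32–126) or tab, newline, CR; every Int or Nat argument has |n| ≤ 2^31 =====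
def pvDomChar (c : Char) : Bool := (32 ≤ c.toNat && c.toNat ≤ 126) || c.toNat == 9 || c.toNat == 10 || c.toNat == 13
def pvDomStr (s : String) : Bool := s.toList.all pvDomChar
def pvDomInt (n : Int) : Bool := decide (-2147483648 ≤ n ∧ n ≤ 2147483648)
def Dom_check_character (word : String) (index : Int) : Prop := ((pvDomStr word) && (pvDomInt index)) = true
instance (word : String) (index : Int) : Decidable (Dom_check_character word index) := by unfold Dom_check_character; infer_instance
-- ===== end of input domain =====

-- B replaces A's enumerate scan with a bounds guard plus direct indexing; objective: simpler.

-- ===== PORT A =====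
-- the enumerate loop: scan with a running counter i, stop when i == index
def check_character_loop (chars : List Char) (i : Nat) (index : Int) : Option String :=
  match chars with
  | [] => none
  | char :: rest =>
    if (i : Int) == index then
      if (PySem.Chars.islower char == true) || (PySem.Chars.isupper char == true) then
        some ("Character '" ++ String.singleton char ++ "' is a letter")
      else if PySem.Chars.isspace char == true then
        some ("Character ' ' is a white space")
      else if PySem.Chars.isdigit char == true then
        some ("Character '" ++ String.singleton char ++ "' is a digit")
      else
        some ("Character '" ++ String.singleton char ++ "' is unknown")
    else
      check_character_loop rest (i + 1) index

def check_character (word : String) (index : Int) : Option String :=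
  check_character_loop word.toList 0 index

-- ===== PORT B =====
def check_character_alt (word : String) (index : Int) : Option String :=
  if index < 0 ∨ (PySem.Str.len word : Int) ≤ index then none
  else
    match PySem.Str.pyGet? word index with
    | none => none  -- unreachable under the bounds guard
    | some char =>
      if PySem.Chars.islower char || PySem.Chars.isupper char then
        some ("Character '" ++ String.singleton char ++ "' is a letter")
      else if PySem.Chars.isspace char then
        some ("Character ' ' is a white space")
      else if PySem.Chars.isdigit char then
        some ("Character '" ++ String.singleton char ++ "' is a digit")
      else
        some ("Character '" ++ String.singleton char ++ "' is unknown")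

-- ===== PRECONDITION & SPEC =====
def Spec_check_character (word : String) (index : Int) (out : Option String) : Prop := out = check_character_alt word index
instance (word : String) (index : Int) (out : Option String) : Decidable (Spec_check_character word index out) := by unfold Spec_check_character; infer_instance

-- ===== CLAIM (what is proved, stated in full; the proofs are below) =====
def Claim_equal_check_character : Prop := ∀ (word : String) (index : Int), Dom_check_character word index → Spec_check_character word index (check_character word index)

-- ===== LEMMAS AND PROOFS =====
def pvClassify (char : Char) : Option String :=
  if PySem.Chars.islower char || PySem.Chars.isupper char then
    some ("Character '" ++ String.singleton char ++ "' is a letter")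
  else if PySem.Chars.isspace char then
    some ("Character ' ' is a white space")
  else if PySem.Chars.isdigit char then
    some ("Character '" ++ String.singleton char ++ "' is a digit")
  else
    some ("Character '" ++ String.singleton char ++ "' is unknown")

theorem check_character_loop_eq (chars : List Char) (i : Nat) (index : Int) :
    check_character_loop chars i index =
      if h : (i : Int) ≤ index ∧ index < (i : Int) + chars.length then
        pvClassify (chars[(index - i).toNat]'(by omega))
      else none := by
  induction chars generalizing i with
  | nil => simp [check_character_loop]
  | cons c rest ih =>
    rw [check_character_loop]
    by_cases hi : (i : Int) = index
    · subst hi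
      rw [dif_pos (by simp only [List.length_cons]; push_cast; omega)]
      simp [pvClassify]
    · have hb : ((i : Int) == index) = false := by simp [hi]
      rw [hb]
      simp only [Bool.false_eq_true, if_false]
      rw [ih (i + 1)]
      by_cases h1 : (i : Int) + 1 ≤ index ∧ index < (i : Int) + 1 + rest.length
      · have hc : ((i + 1 : Nat) : Int) ≤ index ∧ index < ((i + 1 : Nat) : Int) + rest.length := by
          push_cast; omega
        have hc' : (i : Int) ≤ index ∧ index < (i : Int) + (c :: rest).length := by
          simp; omega
        rw [dif_pos hc, dif_pos hc']
        have hk : (index - (i : Int)).toNat = (index - ((i + 1 : Nat) : Int)).toNat + 1 := by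
          push_cast; omega
        simp only [hk, List.getElem_cons_succ]
      · rw [dif_neg (by push_cast; omega), dif_neg (by simp; omega)]

-- ===== VERDICT (by name: the statement is the Claim_ definition above) =====
theorem check_character_spec : Claim_equal_check_character := by
  intro word index _
  unfold Spec_check_character check_character check_character_alt
  rw [check_character_loop_eq]
  have hlen : (PySem.Str.len word : Int) = word.toList.length := by
    simp [PySem.Str.len]
  by_cases h : (0 : Int) ≤ index ∧ index < word.toList.length
  · rw [dif_pos (by push_cast; omega)]
    rw [if_neg (by omega)]
    have hidx : (index - ((0 : Nat) : Int)).toNat = index.toNat := by push_cast; omega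
    have hget : PySem.Str.pyGet? word index = some (word.toList[(index - ((0:Nat) : Int)).toNat]'(by push_cast; omega)) := by
      simp only [PySem.Str.pyGet?, PySem.Chars.pyGet?]
      rw [PySem.List.pyGet?_of_nonneg (h := h.1), List.getElem?_eq_getElem (by omega)]
      simp only [hidx]
    rw [hget]
    simp [pvClassify]
  · rw [dif_neg (by push_cast; omega), if_pos (by omega)]
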